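-- pv_equiv track=rewrite | github.com/arrzdev/Projeto1_FP | prj.py | validar_cifra
-- ===== SOURCE A (Python) =====
-- def validar_cifra(cifra:str, checksum:str) -> bool:
--     '''
--     This function receives a string of characters containing a cipher and another \
--     chain of characters containing a control sequence, and returns True if and only \
--     the sequence is consistent with the cipher as described.
--
--     PARAMETERS
--     ----------
--     - param str cifra:
--     \n\tstring that we are going to run the sort algorithm on
--     - param str checksum:
--     \n\tcontains the control characters inside "[]"
--
--     RETURN
--     ------
--     - result: bool
--     \n\tBoolean, True if control characters and ordered characters are equal
--
--     EXAMPLES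
--     --------
--     "a-b-c-d-e-f-g-h", "[abcde]" -> True\n
--     "a-b-c-d-e-f-g-h", "[xxxxx]" -> False
--     '''
--
--     #get the characters inside the "[", "]"
--     control_characters = checksum[1:-1]
--
--     joined_cifra = cifra.replace("-", "")
--
--     ordered = []
--
--     #we want the 5 letters that are the most common and undraw by alphabetic order
--     for _ in range(5):
--
--         '''
--         start by defining a list that contains on the index 0 the best letter \
--         and on the index 1 the number of times that letter appeared
--         '''
--         best = ["", 0]
--
--         for letter in joined_cifra:
--             letter_count = joined_cifra.count(letter)
--
--             if letter_count > best[1]: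
--                 best = [letter, letter_count]
--
--             elif letter_count == best[1]:
--                 #undraw alphabetically
--                 if ord(letter) < ord(best[0]):
--                     best = [letter, letter_count]
--
--         #add to the ordered list the "best" caracter
--         ordered.append(best[0])
--
--         #remove the letter from the joined_cifra so we do not choose that letter again
--         joined_cifra =  joined_cifra.replace(best[0], "")
--
--     #get the 5 best letters as a string again
--     ordered_string = "".join(ordered)
--
--     result = control_characters == ordered_string
--
--     return result
-- ===== SOURCE B (Python) =====
-- def validar_cifra(cifra: str, checksum: str) -> bool:
--     # one-pass frequency table, then a single sort by (-count, char); top-5 of that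
--     # order is exactly A's 5-round greedy extraction
--     freq = {}
--     for ch in cifra:
--         if ch != '-':
--             freq[ch] = freq.get(ch, 0) + 1
--     top = sorted(freq, key=lambda c: (-freq[c], c))[:5]
--     return checksum[1:-1] == "".join(top)
-- ===== Notes on version B (the rewrite author's own statement) =====
-- stated objective: faster
-- what changed: Replaces the 5-round repeated full-string scan (with a quadratic .count per round) by a single-pass frequency dictionary followed by one sort of the distinct characters by (-count, char) and taking the first five.
import Mathlib
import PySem

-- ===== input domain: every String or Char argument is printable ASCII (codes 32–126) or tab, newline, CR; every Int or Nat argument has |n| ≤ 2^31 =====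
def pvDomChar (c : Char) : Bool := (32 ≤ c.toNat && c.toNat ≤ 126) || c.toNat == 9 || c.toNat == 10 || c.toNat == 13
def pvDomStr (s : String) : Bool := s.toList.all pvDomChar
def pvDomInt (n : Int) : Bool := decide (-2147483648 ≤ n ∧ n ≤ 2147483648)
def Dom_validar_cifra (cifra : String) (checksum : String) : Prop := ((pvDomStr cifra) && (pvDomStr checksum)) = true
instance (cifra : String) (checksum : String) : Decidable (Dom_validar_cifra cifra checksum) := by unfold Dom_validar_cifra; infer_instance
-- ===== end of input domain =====

-- B replaces A's 5-round repeated full-string scans by one frequency table plus one sort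
-- of the distinct characters by (-count, char); return values proved equal on all inputs.

-- ===== PORT A =====
-- literal transliteration of A: checksum[1:-1]; cifra.replace("-",""); 5 rounds each
-- scanning the remaining string for the (max count, min ord) letter, then removing it.
-- Python strings appearing as values (best[0], the elements of `ordered`) are List Char;
-- "".join(ordered) is flatten; str.count with a 1-char needle is PySem.Chars.count.
def validar_cifra (cifra : String) (checksum : String) : Bool :=
  let control_characters := PySem.List.slice checksum.toList (some 1) (some (-1))
  let joined0 := PySem.Chars.replace cifra.toList ['-'] []
  let final := (List.range 5).foldl (fun (st : List (List Char) × List Char) _ =>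
    let joined := st.2
    let best := joined.foldl (fun (best : List Char × Nat) letter =>
      let letter_count := PySem.Chars.count joined [letter]
      if letter_count > best.2 then ([letter], letter_count)
      else if letter_count = best.2 then
        -- ord(best[0]): best[0] = "" here would raise in Python, but this branch is
        -- unreachable then (letter_count ≥ 1 > 0 = best[1] takes the first branch)
        (match best.1.head? with
         | some b => if letter < b then ([letter], letter_count) else best
         | none => best)
      else best) ([], 0)
    (st.1 ++ [best.1], PySem.Chars.replace joined best.1 [])) ([], joined0)
  let ordered_string := final.1.flatten
  control_characters == ordered_string

-- ===== PORT B =====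
-- literal transliteration of Source B: one-pass dict of counts over cifra (skipping '-'),
-- sorted(freq, key=lambda c: (-freq[c], c))[:5], compared with checksum[1:-1].
def validar_cifra_alt (cifra : String) (checksum : String) : Bool :=
  let freq := cifra.toList.foldl (fun (d : PySem.Dict Char Int) ch =>
    if ch != '-' then d.insert ch (d.getD ch 0 + 1) else d) PySem.Dict.empty
  let top := PySem.List.slice
    (PySem.List.sorted2 freq.keys (fun c => -(freq.getD c 0)) (fun c => c)) none (some 5)
  PySem.List.slice checksum.toList (some 1) (some (-1)) == top

-- ===== PRECONDITION & SPEC =====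
def Spec_validar_cifra (cifra : String) (checksum : String) (out : Bool) : Prop := out = validar_cifra_alt cifra checksum
instance (cifra : String) (checksum : String) (out : Bool) : Decidable (Spec_validar_cifra cifra checksum out) := by unfold Spec_validar_cifra; infer_instance

-- ===== CLAIM (what is proved, stated in full; the proofs are below) =====
def Claim_equal_validar_cifra : Prop := ∀ (cifra : String) (checksum : String), Dom_validar_cifra cifra checksum → Spec_validar_cifra cifra checksum (validar_cifra cifra checksum)

-- ===== LEMMAS AND PROOFS =====

theorem pvCountGo (c : Char) : ∀ (l : List Char) (fuel : Nat) (acc : Nat), l.length ≤ fuel →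
    PySem.Chars.count.go [c] fuel l acc = acc + l.count c := by
  intro l
  induction l with
  | nil => intro fuel acc h; cases fuel <;> simp [PySem.Chars.count.go]
  | cons x t ih =>
    intro fuel acc h
    cases fuel with
    | zero => simp at h
    | succ f =>
      have hb : (([c] : List Char).isPrefixOf (x :: t)) = (c == x) := by
        simp [List.isPrefixOf]
      simp only [PySem.Chars.count.go, hb]
      by_cases hx : c = x
      · subst hx
        simp only [BEq.rfl, if_true, List.length_cons, List.length_nil, List.drop_succ_cons, List.drop_zero]
        rw [ih f (acc + 1) (by simpa using h)]
        simp only [List.count_cons, BEq.rfl, if_true]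
        omega
      · simp only [beq_eq_false_iff_ne.2 hx, Bool.false_eq_true, if_false]
        rw [ih f acc (by simpa using h)]
        simp [Ne.symm hx]

theorem pvCountSingleton (S : List Char) (c : Char) : PySem.Chars.count S [c] = S.count c := by
  simp [PySem.Chars.count, pvCountGo c S S.length 0 le_rfl]

theorem pvReplaceGo (m : Char) : ∀ (l : List Char) (fuel : Nat) (acc : List Char), l.length ≤ fuel →
    PySem.Chars.replace.go [m] [] fuel l acc = acc.reverse ++ l.filter (· != m) := by
  intro l
  induction l with
  | nil => intro fuel acc h; cases fuel <;> simp [PySem.Chars.replace.go]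
  | cons x t ih =>
    intro fuel acc h
    cases fuel with
    | zero => simp at h
    | succ f =>
      have hb : (([m] : List Char).isPrefixOf (x :: t)) = (m == x) := by
        simp [List.isPrefixOf]
      simp only [PySem.Chars.replace.go, hb]
      by_cases hx : m = x
      · subst hx
        simp only [BEq.rfl, if_true, List.length_cons, List.length_nil, List.drop_succ_cons,
          List.drop_zero, List.reverse_nil, List.nil_append]
        rw [ih f acc (by simpa using h)]
        simp
      · simp only [beq_eq_false_iff_ne.2 hx, Bool.false_eq_true, if_false]
        rw [ih f (x :: acc) (by simpa using h)]
        simp [Ne.symm hx]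

theorem pvReplaceSingleton (S : List Char) (m : Char) :
    PySem.Chars.replace S [m] [] = S.filter (· != m) := by
  simp [PySem.Chars.replace, pvReplaceGo m S S.length [] le_rfl]

def pvKey (S : List Char) (c : Char) : Lex (Int × Char) := toLex (-(S.count c : Int), c)

def pvL (S : List Char) : List Char := PySem.List.sorted (PySem.Set.ofList S) (pvKey S)

def pvStep (S : List Char) (a c : Char) : Char := if pvKey S c < pvKey S a then c else a

def pvPick (S : List Char) (m : Char) (cs : List Char) : Char := cs.foldl (pvStep S) m

theorem pvKey_lt_iff (S : List Char) (c d : Char) :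
    pvKey S c < pvKey S d ↔ S.count d < S.count c ∨ (S.count c = S.count d ∧ c < d) := by
  simp only [pvKey, Prod.Lex.toLex_lt_toLex]
  constructor
  · rintro (h | ⟨h1, h2⟩)
    · left; exact_mod_cast by omega
    · right; exact ⟨by exact_mod_cast by omega, h2⟩
  · rintro (h | ⟨h1, h2⟩)
    · left; exact_mod_cast by omega
    · right; exact ⟨by exact_mod_cast by omega, h2⟩

theorem pvKey_inj (S : List Char) {c d : Char} (h : pvKey S c = pvKey S d) : c = d := by
  have := toLex.injective h
  exact congrArg Prod.snd this

-- one application of A's inner-loop body, starting from a real letter state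
theorem pvStep_app (S : List Char) (m letter : Char) :
    (if S.count letter > S.count m then ([letter], S.count letter)
     else if S.count letter = S.count m then
       (match ([m] : List Char).head? with
        | some b => if letter < b then ([letter], S.count letter) else ([m], S.count m)
        | none => ([m], S.count m))
     else ([m], S.count m))
    = ([pvStep S m letter], S.count (pvStep S m letter)) := by
  simp only [List.head?_cons, pvStep, pvKey_lt_iff]
  by_cases h1 : S.count letter > S.count m
  · rw [if_pos h1, if_pos (Or.inl h1)]
  · rw [if_neg h1]
    by_cases h2 : S.count letter = S.count m
    · rw [if_pos h2]
      by_cases h3 : letter < m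
      · rw [if_pos h3, if_pos (Or.inr (And.intro h2 h3))]
      · have : ¬(S.count m < S.count letter ∨ S.count letter = S.count m ∧ letter < m) := by
          rintro (h | ⟨_, h⟩) <;> [omega; exact h3 h]
        simp only [if_neg h3, if_neg this]
    · rw [if_neg h2]
      have : ¬(S.count m < S.count letter ∨ S.count letter = S.count m ∧ letter < m) := by
        rintro (h | ⟨h, _⟩) <;> omega
      rw [if_neg this]

-- A's inner loop from a letter state computes the key-minimum (pvPick)
theorem pvFold (S : List Char) : ∀ (cs : List Char) (m : Char),
    cs.foldl (fun (best : List Char × Nat) letter =>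
      if S.count letter > best.2 then ([letter], S.count letter)
      else if S.count letter = best.2 then
        (match best.1.head? with
         | some b => if letter < b then ([letter], S.count letter) else best
         | none => best)
      else best) ([m], S.count m)
    = ([pvPick S m cs], S.count (pvPick S m cs)) := by
  intro cs
  induction cs with
  | nil => intro m; rfl
  | cons letter t ih =>
    intro m
    rw [List.foldl_cons, pvStep_app S m letter, ih (pvStep S m letter)]
    rfl

theorem pvPick_mem (S : List Char) : ∀ (cs : List Char) (m : Char), pvPick S m cs ∈ m :: cs := by
  intro cs
  induction cs with
  | nil => intro m; simp [pvPick]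
  | cons l t ih =>
    intro m
    have h := ih (pvStep S m l)
    have : pvPick S m (l :: t) = pvPick S (pvStep S m l) t := rfl
    rw [this]
    rcases List.mem_cons.1 h with h | h
    · rw [h]; unfold pvStep; split_ifs <;> simp
    · simp [h]

theorem pvPick_le (S : List Char) : ∀ (cs : List Char) (m : Char),
    ∀ x ∈ m :: cs, pvKey S (pvPick S m cs) ≤ pvKey S x := by
  intro cs
  induction cs with
  | nil => intro m x hx; simp at hx; subst hx; exact le_rfl
  | cons l t ih =>
    intro m x hx
    have hstep : ∀ y ∈ ([m, l] : List Char), pvKey S (pvStep S m l) ≤ pvKey S y := by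
      intro y hy
      unfold pvStep
      rcases List.mem_pair.1 hy with rfl | rfl
      · split_ifs with h
        · exact le_of_lt h
        · exact le_rfl
      · split_ifs with h
        · exact le_rfl
        · exact le_of_not_gt h
    have heq : pvPick S m (l :: t) = pvPick S (pvStep S m l) t := rfl
    rw [heq]
    rcases List.mem_cons.1 hx with h | hx
    · exact le_trans (ih (pvStep S m l) _ (List.mem_cons_self)) (h ▸ hstep m (by simp))
    rcases List.mem_cons.1 hx with h | hx
    · exact le_trans (ih (pvStep S m l) _ (List.mem_cons_self)) (h ▸ hstep l (by simp))
    · exact ih (pvStep S m l) x (List.mem_cons_of_mem _ hx)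

theorem pvL_nil : pvL [] = [] := rfl

theorem pvL_ne_nil {S : List Char} (h : S ≠ []) : pvL S ≠ [] := by
  intro hc
  rcases List.exists_mem_of_ne_nil S h with ⟨c, hc'⟩
  have : c ∈ PySem.Set.ofList S := (PySem.Set.mem_ofList _ _).2 hc'
  have := (PySem.List.mem_sorted (xs := PySem.Set.ofList S) (key := pvKey S)
    (rev := false) (x := c)).2 this
  rw [pvL] at hc
  rw [hc] at this
  simp at this

theorem pvL_perm (S : List Char) : (pvL S).Perm (PySem.Set.ofList S) :=
  PySem.List.sorted_perm _ _ _

theorem pvL_nodup (S : List Char) : (pvL S).Nodup :=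
  ((pvL_perm S).nodup_iff).2 (PySem.Set.nodup_ofList S)

theorem pvL_mem (S : List Char) (x : Char) : x ∈ pvL S ↔ x ∈ S := by
  rw [(pvL_perm S).mem_iff]; exact PySem.Set.mem_ofList _ _

-- the head of pvL S is the key-least character of S
theorem pvL_head_le {S : List Char} {m : Char} {t : List Char} (h : pvL S = m :: t) :
    ∀ y ∈ S, pvKey S m ≤ pvKey S y := by
  intro y hy
  exact PySem.List.key_head_sorted_le _ _ h y ((PySem.Set.mem_ofList _ _).2 hy)

-- uniqueness of the key-least element
theorem pvMin_unique {S : List Char} {a b : Char} (ha : a ∈ S) (hb : b ∈ S)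
    (h1 : ∀ y ∈ S, pvKey S a ≤ pvKey S y) (h2 : ∀ y ∈ S, pvKey S b ≤ pvKey S y) : a = b :=
  pvKey_inj S (le_antisymm (h1 b hb) (h2 a ha))

theorem pvKey_filter {S : List Char} {m c : Char} (hc : c ≠ m) :
    pvKey (S.filter (· != m)) c = pvKey S c := by
  simp [pvKey, List.count_filter, hc]

theorem pvL_tail {S : List Char} {m : Char} {t : List Char} (h : pvL S = m :: t) :
    pvL (S.filter (· != m)) = t := by
  have hnodup : (m :: t).Nodup := h ▸ pvL_nodup S
  have hmt : m ∉ t := (List.nodup_cons.1 hnodup).1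
  have htnd : t.Nodup := (List.nodup_cons.1 hnodup).2
  have hmem : ∀ x, x ∈ t ↔ x ∈ S ∧ x ≠ m := by
    intro x
    constructor
    · intro hx
      have hxS : x ∈ S := (pvL_mem S x).1 (h ▸ List.mem_cons_of_mem m hx)
      exact ⟨hxS, fun hxm => hmt (hxm ▸ hx)⟩
    · rintro ⟨hxS, hxm⟩
      have : x ∈ m :: t := h ▸ (pvL_mem S x).2 hxS
      rcases List.mem_cons.1 this with h' | h'
      · exact absurd h' hxm
      · exact h'
  apply PySem.List.sorted_eq_of_perm_of_pairwise_lt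
  · rw [List.perm_ext_iff_of_nodup htnd (PySem.Set.nodup_ofList _)]
    intro x
    rw [hmem x, PySem.Set.mem_ofList, List.mem_filter]
    simp
  · -- strict pairwise on t under the keys of the filtered string
    have hple : (m :: t).Pairwise (fun a b => pvKey S a ≤ pvKey S b) := by
      rw [← h]
      exact PySem.List.sorted_pairwise _ _
    have hlt : t.Pairwise (fun a b => pvKey S a < pvKey S b) := by
      have hand := (List.pairwise_cons.1 hple).2.and (List.nodup_cons.1 hnodup).2
      exact hand.imp (fun ⟨hle, hne⟩ => lt_of_le_of_ne hle (fun he => hne (pvKey_inj S he)))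
    refine hlt.imp_of_mem ?_
    intro a b ha hb hab
    have hna : a ≠ m := ((hmem a).1 ha).2
    have hnb : b ≠ m := ((hmem b).1 hb).2
    rw [pvKey_filter hna, pvKey_filter hnb]
    exact hab

def pvRoundA (st : List (List Char) × List Char) : List (List Char) × List Char :=
  let joined := st.2
  let best := joined.foldl (fun (best : List Char × Nat) letter =>
    let letter_count := PySem.Chars.count joined [letter]
    if letter_count > best.2 then ([letter], letter_count)
    else if letter_count = best.2 then
      (match best.1.head? with
       | some b => if letter < b then ([letter], letter_count) else best
       | none => best)
    else best) ([], 0)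
  (st.1 ++ [best.1], PySem.Chars.replace joined best.1 [])

theorem pvRound_nil (acc : List (List Char)) : pvRoundA (acc, []) = (acc ++ [[]], []) := rfl

theorem pvRound_cons (acc : List (List Char)) (S : List Char) (m : Char) (t : List Char)
    (h : pvL S = m :: t) : pvRoundA (acc, S) = (acc ++ [[m]], S.filter (· != m)) := by
  have hS : S ≠ [] := by intro hS; rw [hS, pvL_nil] at h; cases h
  obtain ⟨c, rest, rfl⟩ : ∃ c rest, S = c :: rest := by
    cases S with
    | nil => exact absurd rfl hS
    | cons c rest => exact ⟨c, rest, rfl⟩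
  simp only [pvRoundA, pvCountSingleton]
  rw [List.foldl_cons]
  have hpos : (c :: rest).count c > 0 := List.count_pos_iff.2 List.mem_cons_self
  rw [if_pos hpos, pvFold (c :: rest) rest c]
  have hpick : pvPick (c :: rest) c rest = m := by
    apply pvMin_unique (S := c :: rest) (pvPick_mem _ rest c)
      ((pvL_mem _ m).1 (h ▸ List.mem_cons_self))
    · exact fun y hy => pvPick_le _ rest c y hy
    · exact pvL_head_le h
  rw [hpick, pvReplaceSingleton]

theorem pvIterRange {α : Type} (g : α → α) (n : Nat) (st : α) :
    (List.range n).foldl (fun s _ => g s) st = g^[n] st := by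
  induction n generalizing st with
  | zero => rfl
  | succ n ih => rw [List.range_succ, List.foldl_append, ih, Function.iterate_succ_apply']; rfl

theorem pvIterFlatten : ∀ (n : Nat) (acc : List (List Char)) (S : List Char),
    (pvRoundA^[n] (acc, S)).1.flatten = acc.flatten ++ (pvL S).take n := by
  intro n
  induction n with
  | zero => intro acc S; simp
  | succ n ih =>
    intro acc S
    rw [Function.iterate_succ_apply]
    by_cases hS : S = []
    · subst hS
      rw [pvRound_nil, ih]
      simp [pvL_nil]
    · obtain ⟨m, t, h⟩ : ∃ m t, pvL S = m :: t := by
        cases hL : pvL S with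
        | nil => exact absurd hL (pvL_ne_nil hS)
        | cons m t => exact ⟨m, t, rfl⟩
      rw [pvRound_cons acc S m t h, ih, pvL_tail h, h]
      simp

theorem pvSorted2Lex {κ1 κ2 : Type} [LinearOrder κ1] [LinearOrder κ2]
    (xs : List Char) (k1 : Char → κ1) (k2 : Char → κ2) :
    PySem.List.sorted2 xs k1 k2 = PySem.List.sorted xs (fun c => toLex (k1 c, k2 c)) := by
  have hcmp : (fun a b : Char => decide (k1 a < k1 b) || (!decide (k1 b < k1 a) && decide (k2 a < k2 b)))
      = (fun a b : Char => decide (toLex (k1 a, k2 a) < toLex (k1 b, k2 b))) := by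
    funext a b
    rcases lt_trichotomy (k1 a) (k1 b) with h | h | h
    · simp [Prod.Lex.toLex_lt_toLex, h, not_lt_of_gt h]
    · simp [Prod.Lex.toLex_lt_toLex, h]
    · simp [Prod.Lex.toLex_lt_toLex, h, not_lt_of_gt h, ne_of_gt h]
  simp only [PySem.List.sorted2, PySem.List.sorted]
  rw [hcmp]
  simp

theorem pvBchain (cs : List Char) :
    (cs.foldl (fun (d : PySem.Dict Char Int) ch =>
      if ch != '-' then d.insert ch (d.getD ch 0 + 1) else d) PySem.Dict.empty)
    = PySem.Dict.counter (cs.filter (· != '-')) := by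
  rw [PySem.List.foldl_if_eq_foldl_filter, PySem.Dict.foldl_insert_getD_add_one_eq_counter]

theorem pvSliceTo5 {α : Type} (xs : List α) : PySem.List.slice xs none (some 5) = xs.take 5 := by
  simpa using PySem.List.slice_to (xs := xs) (b := 5) (by norm_num)

theorem pvMain (cifra checksum : String) :
    validar_cifra cifra checksum = validar_cifra_alt cifra checksum := by
  have hA : validar_cifra cifra checksum =
      (PySem.List.slice checksum.toList (some 1) (some (-1)) ==
        ((List.range 5).foldl (fun st _ => pvRoundA st)
          ([], PySem.Chars.replace cifra.toList ['-'] [])).1.flatten) := rfl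
  rw [pvIterRange pvRoundA 5 _, pvReplaceSingleton, pvIterFlatten 5 [] _] at hA
  simp only [List.flatten_nil, List.nil_append] at hA
  have hB : validar_cifra_alt cifra checksum =
      (PySem.List.slice checksum.toList (some 1) (some (-1)) ==
        PySem.List.slice (PySem.List.sorted2
          (cifra.toList.foldl (fun (d : PySem.Dict Char Int) ch =>
            if ch != '-' then d.insert ch (d.getD ch 0 + 1) else d) PySem.Dict.empty).keys
          (fun c => -((cifra.toList.foldl (fun (d : PySem.Dict Char Int) ch =>
            if ch != '-' then d.insert ch (d.getD ch 0 + 1) else d) PySem.Dict.empty).getD c 0))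
          (fun c => c)) none (some 5)) := rfl
  rw [pvBchain] at hB
  simp only [PySem.Dict.keys_counter, PySem.Dict.getD_counter] at hB
  rw [pvSorted2Lex] at hB
  have hkey : (fun c => toLex (-((cifra.toList.filter (· != '-')).count c : Int), c))
      = pvKey (cifra.toList.filter (· != '-')) := rfl
  rw [hkey] at hB
  rw [pvSliceTo5] at hB
  rw [hA, hB]
  rfl

-- ===== VERDICT (by name: the statement is the Claim_ definition above) =====
theorem validar_cifra_spec : Claim_equal_validar_cifra := by
  intro cifra checksum _
  unfold Spec_validar_cifra
  exact pvMain cifra checksum
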